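-- pv_equiv track=rewrite | github.com/xakepnz/BLUELAY | bluelay.py | create_search_terms
-- ===== SOURCE A (Python) =====
-- def create_search_terms(keywords, sources):
--     terms_ = []
--     for k in keywords:
--         for s in sources:
--             t_ = {
--                 'hl': 'en',
--                 'as_q': None,
--                 'as_epq': '{}'.format(k),
--                 'as_qdr': 'all',
--                 'as_sitesearch': '{}'.format(s),
--                 'as_occt': 'any'
--             }
--             if t_ not in terms_:
--                 terms_.append(t_)
--     return terms_
-- ===== SOURCE B (Python) =====
-- def create_search_terms(keywords, sources):
--     # Dedup each axis once (on the formatted string, first occurrence kept),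
--     # then take the plain product -- no membership test inside the loops.
--     uk = list(dict.fromkeys('{}'.format(k) for k in keywords))
--     us = list(dict.fromkeys('{}'.format(s) for s in sources))
--     return [
--         {
--             'hl': 'en',
--             'as_q': None,
--             'as_epq': k,
--             'as_qdr': 'all',
--             'as_sitesearch': s,
--             'as_occt': 'any'
--         }
--         for k in uk for s in us
--     ]
-- ===== Notes on version B (the rewrite author's own statement) =====
-- stated objective: faster
-- what changed: B dedups each axis once via dict.fromkeys (first occurrence kept, on the formatted string) and then emits the plain product with no in-loop membership scan, instead of A's 'if dict not in result-list' check over the whole accumulated product.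
import Mathlib
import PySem

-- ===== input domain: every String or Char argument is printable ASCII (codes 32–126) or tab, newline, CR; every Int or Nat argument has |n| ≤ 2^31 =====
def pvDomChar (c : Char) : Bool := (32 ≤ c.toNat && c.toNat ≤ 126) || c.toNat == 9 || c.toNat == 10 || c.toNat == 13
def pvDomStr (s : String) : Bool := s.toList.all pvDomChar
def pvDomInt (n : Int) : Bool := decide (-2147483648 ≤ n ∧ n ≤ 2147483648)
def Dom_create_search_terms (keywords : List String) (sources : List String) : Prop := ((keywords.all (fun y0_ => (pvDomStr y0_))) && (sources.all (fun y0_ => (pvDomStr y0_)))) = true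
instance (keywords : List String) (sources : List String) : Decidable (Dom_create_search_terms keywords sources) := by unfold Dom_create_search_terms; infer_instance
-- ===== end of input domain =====

-- B dedups each axis once and takes a plain product, instead of A's membership test
-- over the whole accumulated product; objective: faster (no in-loop scan of the output).

-- the search-term dict built for a keyword/source pair ('{}'.format on a string is the string itself)
def pvMk (k s : String) : List (String × Option String) :=
  [("hl", some "en"), ("as_q", none), ("as_epq", some k),
   ("as_qdr", some "all"), ("as_sitesearch", some s), ("as_occt", some "any")]

-- ===== PORT A =====
def create_search_terms (keywords : List String) (sources : List String) : List (List (String × Option String)) :=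
  keywords.foldl (fun terms_ k =>
    sources.foldl (fun terms_ s =>
      let t_ := pvMk k s
      if t_ ∈ terms_ then terms_ else terms_ ++ [t_]) terms_) []

-- ===== PORT B =====
def create_search_terms_alt (keywords : List String) (sources : List String) : List (List (String × Option String)) :=
  let uk := PySem.List.dedup keywords   -- list(dict.fromkeys(...)): first occurrences, in order
  let us := PySem.List.dedup sources
  uk.flatMap (fun k => us.map (fun s => pvMk k s))

-- ===== PRECONDITION & SPEC =====
def Spec_create_search_terms (keywords : List String) (sources : List String) (out : List (List (String × Option String))) : Prop := out = create_search_terms_alt keywords sources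
instance (keywords : List String) (sources : List String) (out : List (List (String × Option String))) : Decidable (Spec_create_search_terms keywords sources out) := by unfold Spec_create_search_terms; infer_instance

-- ===== CLAIM (what is proved, stated in full; the proofs are below) =====
def Claim_equal_create_search_terms : Prop := ∀ (keywords : List String) (sources : List String), Dom_create_search_terms keywords sources → Spec_create_search_terms keywords sources (create_search_terms keywords sources)

-- ===== LEMMAS AND PROOFS =====

-- dedup-with-accumulator: append each element not yet present
def pvD {α : Type} [DecidableEq α] (acc xs : List α) : List α :=
  xs.foldl (fun a x => if x ∈ a then a else a ++ [x]) acc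

theorem pvD_cons {α : Type} [DecidableEq α] (acc : List α) (x : α) (xs : List α) :
    pvD acc (x :: xs) = pvD (if x ∈ acc then acc else acc ++ [x]) xs := rfl

theorem pvD_append {α : Type} [DecidableEq α] (acc xs ys : List α) :
    pvD acc (xs ++ ys) = pvD (pvD acc xs) ys := by
  simp [pvD, List.foldl_append]

theorem mem_pvD {α : Type} [DecidableEq α] (acc xs : List α) (y : α) :
    y ∈ pvD acc xs ↔ y ∈ acc ∨ y ∈ xs := by
  induction xs generalizing acc with
  | nil => simp [pvD]
  | cons x xs ih =>
      rw [pvD_cons]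
      by_cases h : x ∈ acc
      · simp [h, ih]
        constructor
        · intro hc; rcases hc with hc | hc
          · exact Or.inl hc
          · exact Or.inr (Or.inr hc)
        · intro hc; rcases hc with hc | hc | hc
          · exact Or.inl hc
          · exact Or.inl (hc ▸ h)
          · exact Or.inr hc
      · simp [h, ih, List.mem_append, or_assoc]

theorem pvD_of_subset {α : Type} [DecidableEq α] (acc xs : List α)
    (h : ∀ x ∈ xs, x ∈ acc) : pvD acc xs = acc := by
  induction xs with
  | nil => rfl
  | cons x xs ih =>
      rw [pvD_cons, if_pos (h x (List.mem_cons_self))]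
      exact ih (fun y hy => h y (List.mem_cons_of_mem _ hy))

theorem pvD_shift {α : Type} [DecidableEq α] (a b ys : List α)
    (h : ∀ y ∈ ys, y ∉ a) : pvD (a ++ b) ys = a ++ pvD b ys := by
  induction ys generalizing b with
  | nil => rfl
  | cons y ys ih =>
      rw [pvD_cons, pvD_cons]
      have hy : y ∉ a := h y (List.mem_cons_self)
      have : (y ∈ a ++ b) = (y ∈ b) := by simp [List.mem_append, hy]
      by_cases hb : y ∈ b
      · rw [if_pos (by simp [List.mem_append, hb]), if_pos hb]
        exact ih b (fun z hz => h z (List.mem_cons_of_mem _ hz))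
      · rw [if_neg (by simp [List.mem_append, hy, hb]), if_neg hb, List.append_assoc]
        exact ih (b ++ [y]) (fun z hz => h z (List.mem_cons_of_mem _ hz))

theorem pvD_map {α β : Type} [DecidableEq α] [DecidableEq β] (f : α → β)
    (hf : Function.Injective f) (acc xs : List α) :
    pvD (acc.map f) (xs.map f) = (pvD acc xs).map f := by
  induction xs generalizing acc with
  | nil => rfl
  | cons x xs ih =>
      rw [List.map_cons, pvD_cons, pvD_cons]
      have hmem : (f x ∈ acc.map f) ↔ (x ∈ acc) := by
        constructor
        · intro h; rcases List.mem_map.mp h with ⟨y, hy, hfy⟩; exact (hf hfy) ▸ hy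
        · intro h; exact List.mem_map_of_mem h
      by_cases h : x ∈ acc
      · rw [if_pos (hmem.mpr h), if_pos h]; exact ih acc
      · rw [if_neg (fun hc => h (hmem.mp hc)), if_neg h]
        simpa using ih (acc ++ [x])

-- PySem.List.dedup is pvD []
theorem setAdd_eq {α : Type} [DecidableEq α] (s : List α) (x : α) :
    PySem.Set.add s x = (if x ∈ s then s else s ++ [x]) := by
  simp [PySem.Set.add]

theorem dedup_eq_pvD {α : Type} [DecidableEq α] (xs : List α) :
    PySem.List.dedup xs = pvD [] xs := by
  have h : ∀ (xs acc : List α), List.foldl PySem.Set.add acc xs = pvD acc xs := by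
    intro xs
    induction xs with
    | nil => intro acc; rfl
    | cons x xs ih =>
        intro acc
        rw [List.foldl_cons, pvD_cons, setAdd_eq, ih]
  simpa [PySem.List.dedup, PySem.Set.ofList, PySem.Set.empty] using h xs []

theorem pvMk_inj (k : String) : Function.Injective (fun s => pvMk k s) := by
  intro a b h
  simpa [pvMk] using h

theorem pvMk_eq_iff (k s k' s' : String) : pvMk k s = pvMk k' s' ↔ k = k' ∧ s = s' := by
  simp [pvMk]

-- the product of a keyword list with the deduped source axis
def pvProd (pk us : List String) : List (List (String × Option String)) :=
  pk.flatMap (fun k => us.map (fun s => pvMk k s))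

theorem mem_pvProd (pk us : List String) (k s : String) :
    pvMk k s ∈ pvProd pk us ↔ k ∈ pk ∧ s ∈ us := by
  simp only [pvProd, List.mem_flatMap, List.mem_map]
  constructor
  · rintro ⟨k', hk', s', hs', h⟩
    rcases (pvMk_eq_iff k' s' k s).mp h with ⟨hk, hs⟩
    exact ⟨hk ▸ hk', hs ▸ hs'⟩
  · rintro ⟨hk, hs⟩; exact ⟨k, hk, s, hs, rfl⟩

-- A as a single dedup over the flattened product stream
theorem portA_eq_pvD (keywords sources : List String) :
    create_search_terms keywords sources =
      pvD [] (keywords.flatMap (fun k => sources.map (fun s => pvMk k s))) := by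
  suffices h : ∀ (ks : List String) (acc : List (List (String × Option String))),
      ks.foldl (fun terms_ k =>
        sources.foldl (fun terms_ s =>
          let t_ := pvMk k s
          if t_ ∈ terms_ then terms_ else terms_ ++ [t_]) terms_) acc =
      pvD acc (ks.flatMap (fun k => sources.map (fun s => pvMk k s))) by
    exact h keywords []
  intro ks
  induction ks with
  | nil => intro acc; rfl
  | cons k ks ih =>
      intro acc
      rw [List.foldl_cons, List.flatMap_cons, pvD_append, ih]
      congr 1
      simp only [pvD, List.foldl_map]
      congr 1
      funext x y
      by_cases hm : pvMk k y ∈ x <;> simp [hm]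

-- the key dedup/product exchange
theorem pvD_prod (sources : List String) (ks pk : List String) :
    pvD (pvProd pk (pvD [] sources)) (ks.flatMap (fun k => sources.map (fun s => pvMk k s))) =
      pvProd (pvD pk ks) (pvD [] sources) := by
  induction ks generalizing pk with
  | nil => rfl
  | cons k ks ih =>
      rw [List.flatMap_cons, pvD_append, pvD_cons]
      by_cases hk : k ∈ pk
      · have hrow : pvD (pvProd pk (pvD [] sources)) (sources.map (fun s => pvMk k s)) =
            pvProd pk (pvD [] sources) := by
          apply pvD_of_subset
          intro x hx
          rcases List.mem_map.mp hx with ⟨s, hs, rfl⟩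
          exact (mem_pvProd _ _ _ _).mpr ⟨hk, (mem_pvD _ _ _).mpr (Or.inr hs)⟩
        rw [hrow, if_pos hk, ih pk]
      · have hfresh : ∀ y ∈ sources.map (fun s => pvMk k s), y ∉ pvProd pk (pvD [] sources) := by
          intro y hy hc
          rcases List.mem_map.mp hy with ⟨s, hs, rfl⟩
          exact hk ((mem_pvProd _ _ _ _).mp hc).1
        have hrow : pvD (pvProd pk (pvD [] sources)) (sources.map (fun s => pvMk k s)) =
            pvProd (pk ++ [k]) (pvD [] sources) := by
          have := pvD_shift (pvProd pk (pvD [] sources)) []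
            (sources.map (fun s => pvMk k s)) hfresh
          rw [List.append_nil] at this
          rw [this]
          have hmap : pvD [] (sources.map (fun s => pvMk k s)) =
              (pvD [] sources).map (fun s => pvMk k s) := by
            have := pvD_map (fun s => pvMk k s) (pvMk_inj k) [] sources
            simpa using this
          rw [hmap]
          simp [pvProd]
        rw [hrow, if_neg hk, ih (pk ++ [k])]

-- ===== VERDICT (by name: the statement is the Claim_ definition above) =====
theorem create_search_terms_spec : Claim_equal_create_search_terms := by
  intro keywords sources _
  unfold Spec_create_search_terms
  rw [portA_eq_pvD]
  have h := pvD_prod sources keywords []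
  simp only [pvProd, List.flatMap_nil] at h
  rw [h]
  simp only [create_search_terms_alt, dedup_eq_pvD]
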